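-- pv_equiv track=rewrite | github.com/JinnZ2/Regenerative-intelligence-core | protocols/rosetta_bridge.py | seed_traits_vector
-- ===== SOURCE A (Python) =====
-- _ROSETTA_AVAILABLE = False
--
-- _rosetta_seeds = None
--
-- _LOCAL_SHAPES = {
--     "SHAPE.TETRA": {
--         "shape_id": "SHAPE.TETRA",
--         "name": "tetrahedron",
--         "geometry": "sphere",  # maps to kernel geometry vocabulary
--         "traits": {
--             "families": ["stability", "foundation", "structure"],
--             "element": "earth",
--         },
--     },
--     "SHAPE.CUBE": {
--         "shape_id": "SHAPE.CUBE",
--         "name": "cube",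
--         "geometry": "hexagon",
--         "traits": {
--             "families": ["order", "containment", "protection"],
--             "element": "earth",
--         },
--     },
--     "SHAPE.OCTA": {
--         "shape_id": "SHAPE.OCTA",
--         "name": "octahedron",
--         "geometry": "spiral",
--         "traits": {
--             "families": ["balance", "mediation", "air"],
--             "element": "air",
--         },
--     },
--     "SHAPE.ICOSA": {
--         "shape_id": "SHAPE.ICOSA",
--         "name": "icosahedron",
--         "geometry": "waveform",
--         "traits": {
--             "families": ["flow", "adaptation", "empathy"],
--             "element": "water",
--         },
--     },
--     "SHAPE.DODECA": {
--         "shape_id": "SHAPE.DODECA",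
--         "name": "dodecahedron",
--         "geometry": "spiral",
--         "traits": {
--             "families": ["transcendence", "unity", "cosmos"],
--             "element": "aether",
--         },
--     },
-- }
--
-- _ALL_FAMILIES = sorted({
--     fam
--     for shape in _LOCAL_SHAPES.values()
--     for fam in shape["traits"]["families"]
-- })
--
-- def seed_traits_vector(shape_id):
--     """
--     Return a binary vector over all known trait families for a shape.
--
--     Useful for dot-product or cosine similarity computations in the kernel.
--
--     Returns:
--         tuple: (vector: list[int], family_labels: list[str])
--                vector[i] = 1 if the shape has family_labels[i], else 0.
--                Returns ([], []) if shape is unknown.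
--     """
--     if _ROSETTA_AVAILABLE:
--         return _rosetta_seeds.seed_traits_vector(shape_id)
--
--     shape = _LOCAL_SHAPES.get(shape_id)
--     if not shape:
--         return ([], [])
--
--     families = set(shape["traits"]["families"])
--     vector = [1 if fam in families else 0 for fam in _ALL_FAMILIES]
--     return (vector, list(_ALL_FAMILIES))
-- ===== SOURCE B (Python) =====
-- _ROSETTA_AVAILABLE = False
--
-- _rosetta_seeds = None
--
-- # B keeps only what the function reads: each shape's trait families.
-- _SHAPE_FAMILIES = {
--     "SHAPE.TETRA": ["stability", "foundation", "structure"],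
--     "SHAPE.CUBE": ["order", "containment", "protection"],
--     "SHAPE.OCTA": ["balance", "mediation", "air"],
--     "SHAPE.ICOSA": ["flow", "adaptation", "empathy"],
--     "SHAPE.DODECA": ["transcendence", "unity", "cosmos"],
-- }
--
-- _ALL_FAMILIES = sorted({fam for fams in _SHAPE_FAMILIES.values() for fam in fams})
--
-- _FAMILY_INDEX = {fam: i for i, fam in enumerate(_ALL_FAMILIES)}
--
--
-- def _vector_of(fams):
--     v = [0] * len(_ALL_FAMILIES)
--     for fam in fams:
--         v[_FAMILY_INDEX[fam]] = 1
--     return v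
--
--
-- # Precomputed once at import: shape id -> its finished binary vector.
-- _SHAPE_VECTORS = {sid: _vector_of(fams) for sid, fams in _SHAPE_FAMILIES.items()}
--
--
-- def seed_traits_vector(shape_id):
--     """Binary vector over all known trait families for a shape (B: precomputed table)."""
--     if _ROSETTA_AVAILABLE:
--         return _rosetta_seeds.seed_traits_vector(shape_id)
--
--     vec = _SHAPE_VECTORS.get(shape_id)
--     if vec is None:
--         return ([], [])
--     return (list(vec), list(_ALL_FAMILIES))
-- ===== Notes on version B (the rewrite author's own statement) =====
-- stated objective: alternative
-- what changed: B precomputes once, at import, a shape-id -> binary-vector table (each vector index-filled from a families-only table via a family->position index), so each call is a single dict lookup instead of A's per-call set-membership comprehension over all families.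
import Mathlib
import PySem

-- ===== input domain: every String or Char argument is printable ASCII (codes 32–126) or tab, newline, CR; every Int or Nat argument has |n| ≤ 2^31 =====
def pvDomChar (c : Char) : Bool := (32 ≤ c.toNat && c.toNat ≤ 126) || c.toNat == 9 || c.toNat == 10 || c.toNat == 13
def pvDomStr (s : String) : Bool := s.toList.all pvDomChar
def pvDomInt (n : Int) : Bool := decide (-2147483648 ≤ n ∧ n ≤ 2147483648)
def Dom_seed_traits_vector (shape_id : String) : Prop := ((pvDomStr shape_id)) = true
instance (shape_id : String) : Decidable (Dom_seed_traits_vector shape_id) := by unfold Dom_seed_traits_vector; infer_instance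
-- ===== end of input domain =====

-- B looks the answer up in a table of per-shape binary vectors precomputed once (index-filled
-- from a families-only table), instead of A's per-call membership comprehension over all
-- families (objective: alternative).


-- ===== PORT A =====
-- A shape record: the fields the module stores; the nested "traits" dict is
-- flattened into `families`/`element` (only `families` is ever read).
structure PvShape where
  shape_id : String
  name : String
  geometry : String
  families : List String
  element : String
deriving Repr, DecidableEq

def pvLocalShapes : PySem.Dict String PvShape := PySem.Dict.ofList
  [ ("SHAPE.TETRA",  ⟨"SHAPE.TETRA", "tetrahedron", "sphere",
      ["stability", "foundation", "structure"], "earth"⟩)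
  , ("SHAPE.CUBE",   ⟨"SHAPE.CUBE", "cube", "hexagon",
      ["order", "containment", "protection"], "earth"⟩)
  , ("SHAPE.OCTA",   ⟨"SHAPE.OCTA", "octahedron", "spiral",
      ["balance", "mediation", "air"], "air"⟩)
  , ("SHAPE.ICOSA",  ⟨"SHAPE.ICOSA", "icosahedron", "waveform",
      ["flow", "adaptation", "empathy"], "water"⟩)
  , ("SHAPE.DODECA", ⟨"SHAPE.DODECA", "dodecahedron", "spiral",
      ["transcendence", "unity", "cosmos"], "aether"⟩) ]

-- _ALL_FAMILIES = sorted({fam for shape in _LOCAL_SHAPES.values() for fam in shape["traits"]["families"]})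
def pvAllFamilies : List String :=
  PySem.List.sorted
    (PySem.Set.ofList ((pvLocalShapes.values).flatMap (·.families)))
    (fun x => x) false

-- _ROSETTA_AVAILABLE is the literal False in the module: the guarded branch is dead code in both programs.
def seed_traits_vector (shape_id : String) : List Int × List String :=
  match pvLocalShapes.get? shape_id with
  | none => ([], [])
  | some shape =>
      let families := PySem.Set.ofList shape.families
      let vector := pvAllFamilies.map (fun fam => if fam ∈ families then (1 : Int) else 0)
      (vector, pvAllFamilies)

-- ===== PORT B =====
-- _SHAPE_FAMILIES: only the field the function reads
def pvShapeFamilies : PySem.Dict String (List String) := PySem.Dict.ofList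
  [ ("SHAPE.TETRA",  ["stability", "foundation", "structure"])
  , ("SHAPE.CUBE",   ["order", "containment", "protection"])
  , ("SHAPE.OCTA",   ["balance", "mediation", "air"])
  , ("SHAPE.ICOSA",  ["flow", "adaptation", "empathy"])
  , ("SHAPE.DODECA", ["transcendence", "unity", "cosmos"]) ]

def pvAllFamiliesB : List String :=
  PySem.List.sorted
    (PySem.Set.ofList ((pvShapeFamilies.values).flatMap (fun fams => fams)))
    (fun x => x) false

-- _FAMILY_INDEX = {fam: i for i, fam in enumerate(_ALL_FAMILIES)}
def pvFamilyIndexB : PySem.Dict String Int :=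
  (PySem.List.enumerate pvAllFamiliesB).foldl
    (fun d p => d.insert p.2 p.1) PySem.Dict.empty

-- _vector_of: zero vector index-filled with 1s (every stored family is a key of the
-- index, so the Python KeyError branch of the subscript is unreachable; `none => v` mirrors that)
def pvVectorOf (fams : List String) : List Int :=
  fams.foldl
    (fun v fam =>
      match pvFamilyIndexB.get? fam with
      | some i => v.set i.toNat 1
      | none => v)
    (List.replicate pvAllFamiliesB.length (0 : Int))

-- _SHAPE_VECTORS, built once at import
def pvShapeVectors : PySem.Dict String (List Int) :=
  (pvShapeFamilies.items).foldl
    (fun d p => d.insert p.1 (pvVectorOf p.2)) PySem.Dict.empty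

def seed_traits_vector_alt (shape_id : String) : List Int × List String :=
  match pvShapeVectors.get? shape_id with
  | none => ([], [])
  | some vec => (vec, pvAllFamiliesB)

-- ===== PRECONDITION & SPEC =====
def Spec_seed_traits_vector (shape_id : String) (out : List Int × List String) : Prop := out = seed_traits_vector_alt shape_id
instance (shape_id : String) (out : List Int × List String) : Decidable (Spec_seed_traits_vector shape_id out) := by unfold Spec_seed_traits_vector; infer_instance

-- ===== CLAIM (what is proved, stated in full; the proofs are below) =====
def Claim_equal_seed_traits_vector : Prop := ∀ (shape_id : String), Dom_seed_traits_vector shape_id → Spec_seed_traits_vector shape_id (seed_traits_vector shape_id)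

-- ===== LEMMAS AND PROOFS =====

-- The sorted dedup of the families, written out (String '<' does not kernel-evaluate,
-- so each sort is named via sorted_eq_of_perm_of_pairwise_lt instead of computed).
def pvAllFamiliesLit : List String :=
  ["adaptation", "air", "balance", "containment", "cosmos", "empathy", "flow", "foundation",
   "mediation", "order", "protection", "stability", "structure", "transcendence", "unity"]

theorem pvAllFamilies_eq : pvAllFamilies = pvAllFamiliesLit := by
  unfold pvAllFamilies
  apply PySem.List.sorted_eq_of_perm_of_pairwise_lt
  · decide
  · simp only [String.lt_iff_toList_lt]
    decide

theorem pvAllFamiliesB_eq : pvAllFamiliesB = pvAllFamiliesLit := by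
  unfold pvAllFamiliesB
  apply PySem.List.sorted_eq_of_perm_of_pairwise_lt
  · decide
  · simp only [String.lt_iff_toList_lt]
    decide

-- Both ports branch only on a dict lookup over the same five literal keys; each hit case is
-- closed by kernel evaluation after naming the two sorts, the miss case by both returning ([], []).
theorem seed_traits_vector_eq_alt (shape_id : String) :
    seed_traits_vector shape_id = seed_traits_vector_alt shape_id := by
  by_cases h1 : shape_id = "SHAPE.TETRA"
  · subst h1; simp only [seed_traits_vector, seed_traits_vector_alt, pvShapeVectors, pvVectorOf,
      pvFamilyIndexB, pvAllFamilies_eq, pvAllFamiliesB_eq]; decide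
  by_cases h2 : shape_id = "SHAPE.CUBE"
  · subst h2; simp only [seed_traits_vector, seed_traits_vector_alt, pvShapeVectors, pvVectorOf,
      pvFamilyIndexB, pvAllFamilies_eq, pvAllFamiliesB_eq]; decide
  by_cases h3 : shape_id = "SHAPE.OCTA"
  · subst h3; simp only [seed_traits_vector, seed_traits_vector_alt, pvShapeVectors, pvVectorOf,
      pvFamilyIndexB, pvAllFamilies_eq, pvAllFamiliesB_eq]; decide
  by_cases h4 : shape_id = "SHAPE.ICOSA"
  · subst h4; simp only [seed_traits_vector, seed_traits_vector_alt, pvShapeVectors, pvVectorOf,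
      pvFamilyIndexB, pvAllFamilies_eq, pvAllFamiliesB_eq]; decide
  by_cases h5 : shape_id = "SHAPE.DODECA"
  · subst h5; simp only [seed_traits_vector, seed_traits_vector_alt, pvShapeVectors, pvVectorOf,
      pvFamilyIndexB, pvAllFamilies_eq, pvAllFamiliesB_eq]; decide
  -- miss case: both lookups fail on any other key
  have hgetA : pvLocalShapes.get? shape_id = none := by
    have hD : pvLocalShapes = PySem.Dict.mk
        [ ("SHAPE.TETRA",  ⟨"SHAPE.TETRA", "tetrahedron", "sphere", ["stability", "foundation", "structure"], "earth"⟩)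
        , ("SHAPE.CUBE",   ⟨"SHAPE.CUBE", "cube", "hexagon", ["order", "containment", "protection"], "earth"⟩)
        , ("SHAPE.OCTA",   ⟨"SHAPE.OCTA", "octahedron", "spiral", ["balance", "mediation", "air"], "air"⟩)
        , ("SHAPE.ICOSA",  ⟨"SHAPE.ICOSA", "icosahedron", "waveform", ["flow", "adaptation", "empathy"], "water"⟩)
        , ("SHAPE.DODECA", ⟨"SHAPE.DODECA", "dodecahedron", "spiral", ["transcendence", "unity", "cosmos"], "aether"⟩) ] := by
      decide
    rw [hD]
    simp [PySem.Dict.get?, beq_iff_eq, Ne.symm h1, Ne.symm h2, Ne.symm h3, Ne.symm h4, Ne.symm h5]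
  have hgetB : pvShapeVectors.get? shape_id = none := by
    have hKeys : pvShapeVectors = PySem.Dict.mk
        [ ("SHAPE.TETRA", pvVectorOf ["stability", "foundation", "structure"])
        , ("SHAPE.CUBE", pvVectorOf ["order", "containment", "protection"])
        , ("SHAPE.OCTA", pvVectorOf ["balance", "mediation", "air"])
        , ("SHAPE.ICOSA", pvVectorOf ["flow", "adaptation", "empathy"])
        , ("SHAPE.DODECA", pvVectorOf ["transcendence", "unity", "cosmos"]) ] := by
      rfl
    rw [hKeys]
    simp [PySem.Dict.get?, beq_iff_eq, Ne.symm h1, Ne.symm h2, Ne.symm h3, Ne.symm h4, Ne.symm h5]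
  simp [seed_traits_vector, seed_traits_vector_alt, hgetA, hgetB]

-- ===== VERDICT (by name: the statement is the Claim_ definition above) =====
theorem seed_traits_vector_spec : Claim_equal_seed_traits_vector := by
  intro shape_id _
  unfold Spec_seed_traits_vector
  exact seed_traits_vector_eq_alt shape_id
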